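-- pv_equiv track=rewrite | github.com/quirtt/ProgDS | Control Flow/NICE strings.py | checkNICE
-- ===== SOURCE A (Python) =====
-- vowels = ['a', 'e', 'i', 'o', 'u']
--
-- def checkNICE(Str):
--     vowelArray = []
--     for i in range(len(Str)):
--         if(Str[i] in vowels):
--             vowelArray.append(i)
--
--     # Check if vowelArray is an AP
--     if(len(vowelArray) <= 1):
--         return True
--     else:
--         start = vowelArray[0]
--         second = vowelArray[1]
--     for i in range(len(vowelArray) - 1):
--         if(vowelArray[i+1] - vowelArray[i] != second-start):
--             return False
--
--     return True
-- ===== SOURCE B (Python) =====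
-- vowels = ['a', 'e', 'i', 'o', 'u']
--
-- def checkNICE(Str):
--     # Single pass with scalar state: last vowel index and expected gap.
--     prev = None
--     gap = None
--     for i, c in enumerate(Str):
--         if c in vowels:
--             if prev is not None:
--                 if gap is None:
--                     gap = i - prev
--                 elif i - prev != gap:
--                     return False
--             prev = i
--     return True
-- ===== Notes on version B (the rewrite author's own statement) =====
-- stated objective: simpler
-- what changed: B makes one pass over the string keeping only two scalars (last vowel index, expected gap) and stops at the first violated gap, instead of A's two phases that always build the full list of vowel positions before scanning it.
import Mathlib
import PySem

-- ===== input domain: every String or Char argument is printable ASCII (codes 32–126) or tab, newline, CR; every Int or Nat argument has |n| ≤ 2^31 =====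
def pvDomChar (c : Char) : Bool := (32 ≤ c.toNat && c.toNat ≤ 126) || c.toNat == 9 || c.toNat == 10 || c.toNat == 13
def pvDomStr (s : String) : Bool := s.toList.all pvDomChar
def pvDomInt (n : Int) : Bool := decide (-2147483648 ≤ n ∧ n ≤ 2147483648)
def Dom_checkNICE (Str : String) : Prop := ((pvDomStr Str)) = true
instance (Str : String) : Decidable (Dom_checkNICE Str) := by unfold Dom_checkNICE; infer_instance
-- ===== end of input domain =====

-- B replaces A's two phases (build the vowel-index list, then scan it) by one pass over the
-- string keeping only two scalars (last vowel index, expected gap): simpler, O(1) extra space.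

-- ===== PORT A =====
def pvVowels : List Char := ['a', 'e', 'i', 'o', 'u']

-- for i in range(len(Str)): if Str[i] in vowels: vowelArray.append(i)
def pvVowelArray (cs : List Char) : List Nat :=
  (List.range cs.length).foldl
    (fun acc i => if cs.getD i ' ' ∈ pvVowels then acc ++ [i] else acc) []

-- the part of A after the first loop
def pvAPScan (vowelArray : List Nat) : Bool :=
  if vowelArray.length ≤ 1 then true
  else
    let start := vowelArray.getD 0 0
    let second := vowelArray.getD 1 0
    -- for i in range(len(vowelArray)-1): if ... : return False  /  return True
    (List.range (vowelArray.length - 1)).all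
      (fun i => ((vowelArray.getD (i+1) 0 : Int) - (vowelArray.getD i 0 : Int)
                  == (second : Int) - (start : Int)))

def checkNICE (Str : String) : Bool := pvAPScan (pvVowelArray Str.toList)

-- ===== PORT B =====
-- one pass, state = (prev : last vowel index, gap : expected gap); early return False → false
def checkNICE_altGo : List Char → Nat → Option Nat → Option Int → Bool
  | [], _, _, _ => true
  | c :: rest, i, prev, gap =>
    if c ∈ pvVowels then
      match prev with
      | none => checkNICE_altGo rest (i+1) (some i) gap
      | some p =>
        match gap with
        | none => checkNICE_altGo rest (i+1) (some i) (some ((i : Int) - (p : Int)))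
        | some g =>
          if ((i : Int) - (p : Int)) ≠ g then false
          else checkNICE_altGo rest (i+1) (some i) gap
    else checkNICE_altGo rest (i+1) prev gap

def checkNICE_alt (Str : String) : Bool :=
  checkNICE_altGo Str.toList 0 none none

-- ===== PRECONDITION & SPEC =====
def Spec_checkNICE (Str : String) (out : Bool) : Prop := out = checkNICE_alt Str
instance (Str : String) (out : Bool) : Decidable (Spec_checkNICE Str out) := by unfold Spec_checkNICE; infer_instance

-- ===== CLAIM (what is proved, stated in full; the proofs are below) =====
def Claim_equal_checkNICE : Prop := ∀ (Str : String), Dom_checkNICE Str → Spec_checkNICE Str (checkNICE Str)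

-- ===== LEMMAS AND PROOFS =====

-- vowel indices of cs, absolute offset i (the common intermediate both ports are reduced to)
def vIdxs : List Char → Nat → List Nat
  | [], _ => []
  | c :: rest, i => if c ∈ pvVowels then i :: vIdxs rest (i+1) else vIdxs rest (i+1)

def pairsOK (d : Int) : List Nat → Nat → Bool
  | [], _ => true
  | x :: rest, p => (((x : Int) - (p : Int)) == d) && pairsOK d rest x

def apCheck : List Nat → Bool
  | [] => true
  | [_] => true
  | a :: b :: rest => pairsOK ((b : Int) - (a : Int)) (b :: rest) a

-- the filtered range of A's first loop is vIdxs
theorem vIdxs_eq_filter (cs : List Char) (k : Nat) :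
    vIdxs cs k = ((List.range cs.length).filter
      (fun i => cs.getD i ' ' ∈ pvVowels)).map (· + k) := by
  induction cs generalizing k with
  | nil => simp [vIdxs]
  | cons c rest ih =>
    simp only [List.length_cons, List.range_succ_eq_map, List.filter_cons, vIdxs]
    by_cases h : c ∈ pvVowels <;>
      simp [h, ih (k+1), List.filter_map, List.map_map, Function.comp_def,
        Nat.succ_eq_add_one, Nat.add_comm, Nat.add_left_comm]
    all_goals rfl

-- A's second loop on a list a::b::rest is pairsOK
theorem allRange_eq_pairsOK (d : Int) (x : Nat) (l : List Nat) :
    ((List.range (x :: l).length.pred).all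
      (fun i => (((x :: l).getD (i+1) 0 : Int) - ((x :: l).getD i 0 : Int) == d)))
      = pairsOK d l x := by
  induction l generalizing x with
  | nil => simp [pairsOK]
  | cons y rest ih =>
    simp only [List.length_cons, Nat.pred_succ] at *
    rw [List.range_succ_eq_map]
    simp only [List.all_cons, List.all_map, Function.comp_def,
      List.getD_cons_succ, List.getD_cons_zero]
    have ihy := ih y
    simp only [List.getD_cons_succ] at ihy
    rw [ihy]
    simp [pairsOK]

-- A reduces to apCheck of the vowel-index list
theorem checkNICE_eq_apCheck (Str : String) :
    checkNICE Str = apCheck (vIdxs Str.toList 0) := by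
  have hva : pvVowelArray Str.toList = vIdxs Str.toList 0 := by
    unfold pvVowelArray
    rw [PySem.List.foldl_append_ite_eq_filter, vIdxs_eq_filter Str.toList 0]
    simp
  unfold checkNICE
  rw [hva]
  generalize vIdxs Str.toList 0 = vs
  match vs with
  | [] => simp [pvAPScan, apCheck]
  | [a] => simp [pvAPScan, apCheck]
  | a :: b :: rest =>
    have hlen : ¬ (a :: b :: rest).length ≤ 1 := by simp
    simp only [pvAPScan, hlen, if_false, List.getD_cons_zero, List.getD_cons_succ, apCheck]
    rw [← allRange_eq_pairsOK ((b : Int) - (a : Int)) a (b :: rest)]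
    simp

-- B's loop invariant: the three reachable state shapes, simultaneously
theorem altGo_inv (cs : List Char) (i : Nat) :
    (checkNICE_altGo cs i none none = apCheck (vIdxs cs i)) ∧
    (∀ p, checkNICE_altGo cs i (some p) none = apCheck (p :: vIdxs cs i)) ∧
    (∀ p g, checkNICE_altGo cs i (some p) (some g) = pairsOK g (vIdxs cs i) p) := by
  induction cs generalizing i with
  | nil => simp [checkNICE_altGo, vIdxs, apCheck, pairsOK]
  | cons c rest ih =>
    obtain ⟨ih1, ih2, ih3⟩ := ih (i+1)
    by_cases h : c ∈ pvVowels
    · refine ⟨?_, fun p => ?_, fun p g => ?_⟩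
      · simp [checkNICE_altGo, vIdxs, h, ih2]
      · simp only [checkNICE_altGo, vIdxs, h, if_pos, ih3]
        match hv : vIdxs rest (i+1) with
        | [] => simp [apCheck, pairsOK]
        | y :: tl => simp [apCheck, pairsOK]
      · simp only [checkNICE_altGo, vIdxs, h, if_pos]
        by_cases hg : ((i : Int) - (p : Int)) = g
        · simp [hg, ih3, pairsOK]
        · simp [hg, pairsOK]
    · simp [checkNICE_altGo, vIdxs, h, ih1, ih2, ih3]

-- ===== VERDICT (by name: the statement is the Claim_ definition above) =====
theorem checkNICE_spec : Claim_equal_checkNICE := by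
  intro Str _
  unfold Spec_checkNICE checkNICE_alt
  rw [checkNICE_eq_apCheck, (altGo_inv Str.toList 0).1]
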